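-- pv_equiv track=rewrite | github.com/iambodha/BWINF-2024 | Aufgabe5.py | erstelleAnweisungen
-- ===== SOURCE A (Python) =====
-- def erstelleAnweisungen(zeitmarken):
--    anweisungen = []
--    anweisungen.append(f"Warte {zeitmarken[0]} Minuten")
--    anweisungen.append(f"laufe in den Abschnitt 1")
--    for i in range(1, len(zeitmarken)):
--        warteMinuten = zeitmarken[i] - zeitmarken[i - 1]
--        anweisungen.append(f"Warte {warteMinuten} Minuten")
--        if i < len(zeitmarken) - 1:
--            anweisungen.append(f"laufe in den Abschnitt {i + 1}")
--        else:
--            anweisungen.append("laufe zum Grabmal")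
--
--    ergebnisListe = []
--    index = 0
--
--    while index < len(anweisungen):
--        if anweisungen[index] == "Warte 0 Minuten":
--            if ergebnisListe:
--                ergebnisListe.pop()
--        else:
--            ergebnisListe.append(anweisungen[index])
--        index += 1
--    anweisungen = ergebnisListe
--    return ', '.join(anweisungen)
-- ===== SOURCE B (Python) =====
-- def erstelleAnweisungen(zeitmarken):
--     out = [] if zeitmarken[0] == 0 else [f"Warte {zeitmarken[0]} Minuten"]
--     if len(zeitmarken) == 1:
--         out.append("laufe in den Abschnitt 1")
--         return ', '.join(out)
--     for k in range(1, len(zeitmarken)):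
--         d = zeitmarken[k] - zeitmarken[k - 1]
--         if d != 0:
--             out.append(f"laufe in den Abschnitt {k}")
--             out.append(f"Warte {d} Minuten")
--     out.append("laufe zum Grabmal")
--     return ', '.join(out)
-- ===== Notes on version B (the rewrite author's own statement) =====
-- stated objective: simpler
-- what changed: A builds the full instruction list and then removes zero-waits (each popping the preceding 'laufe' line) in a second stack-cleanup scan; B emits only the needed lines in a single forward pass that skips zero-diff pairs, with no second scan and no pop.
import Mathlib
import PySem

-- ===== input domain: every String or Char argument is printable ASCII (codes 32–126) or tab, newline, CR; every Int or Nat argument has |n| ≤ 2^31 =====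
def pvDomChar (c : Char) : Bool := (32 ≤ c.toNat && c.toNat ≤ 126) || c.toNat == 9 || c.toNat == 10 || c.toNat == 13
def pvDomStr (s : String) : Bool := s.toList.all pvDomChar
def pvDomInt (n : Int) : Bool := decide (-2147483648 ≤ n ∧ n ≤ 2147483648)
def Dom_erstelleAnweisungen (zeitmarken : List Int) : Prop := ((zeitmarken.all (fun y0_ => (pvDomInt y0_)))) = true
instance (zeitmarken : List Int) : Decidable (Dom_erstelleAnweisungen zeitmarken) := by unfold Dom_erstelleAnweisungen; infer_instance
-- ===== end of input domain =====

-- B replaces A's build-then-stack-cleanup two-phase construction by a single forward pass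
-- that emits only the non-zero waits (objective: simpler). Return-value equivalence only.

-- ===== PORT A =====
-- loop body of A's `for i in range(1, len(zeitmarken))`
def stepA (zs : List Int) (acc : List String) (i : Int) : List String :=
  let warteMinuten := PySem.List.pyGetD zs i 0 - PySem.List.pyGetD zs (i - 1) 0
  let acc := acc ++ ["Warte " ++ PySem.Int.toStr warteMinuten ++ " Minuten"]
  if i < (zs.length : Int) - 1 then
    acc ++ ["laufe in den Abschnitt " ++ PySem.Int.toStr (i + 1)]
  else
    acc ++ ["laufe zum Grabmal"]

-- body of A's cleanup while-loop (one element of `anweisungen` at a time)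
def stepClean (erg : List String) (s : String) : List String :=
  if s = "Warte 0 Minuten" then (if erg = [] then erg else erg.dropLast)
  else erg ++ [s]

def erstelleAnweisungen (zeitmarken : List Int) : String :=
  let anweisungen : List String :=
    ["Warte " ++ PySem.Int.toStr (PySem.List.pyGetD zeitmarken 0 0) ++ " Minuten",
     "laufe in den Abschnitt 1"]
  let anweisungen := (PySem.List.pyRange 1 (zeitmarken.length : Int) 1).foldl (stepA zeitmarken) anweisungen
  let ergebnisListe := anweisungen.foldl stepClean ([] : List String)
  PySem.Str.join ", " ergebnisListe

-- ===== PORT B =====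
-- loop body of Source B's `for k in range(1, len(zeitmarken))`
def stepB (zs : List Int) (acc : List String) (k : Int) : List String :=
  let d := PySem.List.pyGetD zs k 0 - PySem.List.pyGetD zs (k - 1) 0
  if d ≠ 0 then
    acc ++ ["laufe in den Abschnitt " ++ PySem.Int.toStr k,
            "Warte " ++ PySem.Int.toStr d ++ " Minuten"]
  else acc

def erstelleAnweisungen_alt (zeitmarken : List Int) : String :=
  let z0 := PySem.List.pyGetD zeitmarken 0 0
  let out := if z0 = 0 then ([] : List String)
             else ["Warte " ++ PySem.Int.toStr z0 ++ " Minuten"]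
  if zeitmarken.length = 1 then
    PySem.Str.join ", " (out ++ ["laufe in den Abschnitt 1"])
  else
    let out := (PySem.List.pyRange 1 (zeitmarken.length : Int) 1).foldl (stepB zeitmarken) out
    PySem.Str.join ", " (out ++ ["laufe zum Grabmal"])

-- ===== PRECONDITION & SPEC =====
-- A evaluates zeitmarken[0], raising IndexError on the empty list; Pre_ excludes exactly that.
def Pre_erstelleAnweisungen (zeitmarken : List Int) : Prop := zeitmarken ≠ []
instance (zeitmarken : List Int) : Decidable (Pre_erstelleAnweisungen zeitmarken) := by
  unfold Pre_erstelleAnweisungen; infer_instance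

def pvWitness_erstelleAnweisungen : List Int := [0, 3, 3, 7]

def Spec_erstelleAnweisungen (zeitmarken : List Int) (out : String) : Prop := out = erstelleAnweisungen_alt zeitmarken
instance (zeitmarken : List Int) (out : String) : Decidable (Spec_erstelleAnweisungen zeitmarken out) := by unfold Spec_erstelleAnweisungen; infer_instance

-- ===== CLAIM (what is proved, stated in full; the proofs are below) =====
def Claim_equal_erstelleAnweisungen : Prop := ∀ (zeitmarken : List Int), Dom_erstelleAnweisungen zeitmarken → Pre_erstelleAnweisungen zeitmarken → Spec_erstelleAnweisungen zeitmarken (erstelleAnweisungen zeitmarken)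

-- ===== LEMMAS AND PROOFS =====

lemma toDigitsCore_len_le (f : Nat) : ∀ (m : Nat) (l : List Char),
    l.length ≤ (Nat.toDigitsCore 10 f m l).length := by
  induction f with
  | zero => intro m l; simp [Nat.toDigitsCore]
  | succ f ih =>
      intro m l
      simp only [Nat.toDigitsCore]
      split
      · simp
      · exact le_trans (by simp) (ih (m / 10) _)


lemma toDigits_big (n : Nat) (h : 10 ≤ n) : Nat.toDigits 10 n ≠ ['0'] := by
  intro he
  have h1 : Nat.toDigits 10 n = Nat.toDigitsCore 10 (n + 1) n [] := rfl
  rw [h1] at he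
  have hn : ¬ (n / 10 = 0) := by omega
  simp only [Nat.toDigitsCore, hn, if_false] at he
  have h2 : 1 ≤ (Nat.toDigitsCore 10 n (n / 10) []).length := by
    rcases n with _ | n'
    · omega
    · simp only [Nat.toDigitsCore]
      split
      · simp
      · exact le_trans (by simp) (toDigitsCore_len_le n' _ _)
  have h3 := Nat.toDigitsCore_lens_eq 10 n (n / 10) ((n % 10).digitChar) []
  have h4 := congrArg List.length he
  simp at h4
  omega

lemma toChars_eq_zero_iff (d : Int) : PySem.Int.toChars d = ['0'] ↔ d = 0 := by
  constructor
  · intro h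
    unfold PySem.Int.toChars at h
    split at h
    · simp at h
    · by_cases hb : 10 ≤ d.toNat
      · exact absurd h (toDigits_big _ hb)
      · have hlt : d.toNat < 10 := by omega
        have hd : Nat.toDigits 10 d.toNat = [(d.toNat % 10).digitChar] := by
          have h0 : d.toNat / 10 = 0 := by omega
          simp [Nat.toDigits, Nat.toDigitsCore, h0]
        rw [hd] at h
        have : d.toNat = 0 := by
          interval_cases h' : d.toNat <;> simp_all <;> exact absurd h (by decide)
        rename_i hnn
        omega
  · rintro rfl; decide

lemma warte_eq_iff (d : Int) :
    ("Warte " ++ PySem.Int.toStr d ++ " Minuten" = "Warte 0 Minuten") ↔ d = 0 := by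
  have h0 : ("Warte 0 Minuten" : String) = "Warte " ++ PySem.Int.toStr 0 ++ " Minuten" := by decide
  rw [h0]
  constructor
  · intro h
    have h1 := congrArg String.toList h
    simp only [String.toList_append, PySem.Int.toList_toStr] at h1
    rw [List.append_assoc, List.append_assoc] at h1
    have h2 := List.append_cancel_left h1
    have h3 := List.append_cancel_right h2
    rw [← toChars_eq_zero_iff]
    simpa using h3
  · rintro rfl; rfl

lemma laufe_ne (k : Int) :
    ("laufe in den Abschnitt " ++ PySem.Int.toStr k) ≠ "Warte 0 Minuten" := by
  intro h
  have h1 := congrArg PySem.Str.len h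
  simp only [PySem.Str.len_append] at h1
  have h2 : PySem.Str.len "laufe in den Abschnitt " = 23 := by decide
  have h3 : PySem.Str.len "Warte 0 Minuten" = 15 := by decide
  have h4 : 0 ≤ PySem.Str.len (PySem.Int.toStr k) := by simp [PySem.Str.len_eq]
  omega

lemma getD_of_drop (zs : List Int) (j : Nat) (x : Int) (t : List Int)
    (h : zs.drop j = x :: t) : PySem.List.pyGetD zs (j : Int) 0 = x := by
  rw [PySem.List.pyGetD_natCast]
  have h1 : zs[j]? = some x := by
    have h2 : (zs.drop j)[0]? = zs[j + 0]? := List.getElem?_drop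
    rw [h] at h2
    simpa using h2.symm
  simp [List.getD_eq_getElem?_getD, h1]

-- what B's loop appends from position k on (proof-side view of stepB's fold)
def altSeg (prev : Int) (rest : List Int) (k : Int) : List String :=
  match rest with
  | [] => []
  | z :: rs =>
      let d := z - prev
      (if d ≠ 0 then
        ["laufe in den Abschnitt " ++ PySem.Int.toStr k,
         "Warte " ++ PySem.Int.toStr d ++ " Minuten"]
       else []) ++ altSeg z rs (k + 1)

-- the exact list A's build phase produces from position k on
def segA (prev : Int) (rest : List Int) (k : Int) : List String :=
  match rest with
  | [] => []
  | z :: rs =>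
      ("Warte " ++ PySem.Int.toStr (z - prev) ++ " Minuten") ::
      (if rs = [] then "laufe zum Grabmal"
       else "laufe in den Abschnitt " ++ PySem.Int.toStr (k + 1)) ::
      segA z rs (k + 1)

lemma loopA (zs : List Int) : ∀ (rest : List Int) (j : Nat) (prev : Int) (acc : List String),
    zs.drop j = prev :: rest →
    (PySem.List.pyRange ((j : Int) + 1) (zs.length : Int) 1).foldl (stepA zs) acc
      = acc ++ segA prev rest ((j : Int) + 1) := by
  intro rest
  induction rest with
  | nil =>
      intro j prev acc h
      have hj : zs.length - j = 1 := by
        have := congrArg List.length h; simpa using this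
      have hj2 : j < zs.length := by
        by_contra hc
        rw [List.drop_eq_nil_of_le (by omega)] at h; simp at h
      rw [PySem.List.pyRange_one_eq_nil (by omega)]
      simp [segA]
  | cons z rs ih =>
      intro j prev acc h
      have hlen0 : zs.length - j = rs.length + 2 := by
        have := congrArg List.length h; simpa using this
      have hj2 : j < zs.length := by
        by_contra hc
        rw [List.drop_eq_nil_of_le (by omega)] at h; simp at h
      have hcons : PySem.List.pyRange ((j : Int) + 1) (zs.length : Int) 1
          = ((j : Int) + 1) :: PySem.List.pyRange (((j : Int) + 1) + 1) (zs.length : Int) 1 :=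
        PySem.List.pyRange_one_cons (by omega)
      rw [hcons]
      simp only [List.foldl_cons]
      have hdrop : zs.drop (j + 1) = z :: rs := by
        have hdd : zs.drop (j + 1) = (zs.drop j).drop 1 := by
          rw [List.drop_drop]
        rw [hdd, h]; rfl
      have hih := ih (j + 1) z (stepA zs acc ((j : Int) + 1)) hdrop
      push_cast at hih
      rw [hih]
      have hz : PySem.List.pyGetD zs ((j : Int) + 1) 0 = z := by
        have := getD_of_drop zs (j + 1) z rs hdrop
        push_cast at this; exact this
      have hp : PySem.List.pyGetD zs ((j : Int) + 1 - 1) 0 = prev := by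
        have := getD_of_drop zs j prev (z :: rs) h
        simpa using this
      simp only [stepA, hz, hp, segA]
      rcases rs with _ | ⟨z2, rs2⟩
      · rw [if_neg (by simp at hlen0; omega)]
        simp [segA]
      · rw [if_pos (by simp at hlen0; omega)]
        simp

lemma loopB (zs : List Int) : ∀ (rest : List Int) (j : Nat) (prev : Int) (acc : List String),
    zs.drop j = prev :: rest →
    (PySem.List.pyRange ((j : Int) + 1) (zs.length : Int) 1).foldl (stepB zs) acc
      = acc ++ altSeg prev rest ((j : Int) + 1) := by
  intro rest
  induction rest with
  | nil =>
      intro j prev acc h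
      have hj : zs.length - j = 1 := by
        have := congrArg List.length h; simpa using this
      have hj2 : j < zs.length := by
        by_contra hc
        rw [List.drop_eq_nil_of_le (by omega)] at h; simp at h
      rw [PySem.List.pyRange_one_eq_nil (by omega)]
      simp [altSeg]
  | cons z rs ih =>
      intro j prev acc h
      have hlen0 : zs.length - j = rs.length + 2 := by
        have := congrArg List.length h; simpa using this
      have hj2 : j < zs.length := by
        by_contra hc
        rw [List.drop_eq_nil_of_le (by omega)] at h; simp at h
      rw [PySem.List.pyRange_one_cons (a := (j : Int) + 1) (b := (zs.length : Int)) (by omega)]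
      simp only [List.foldl_cons]
      have hdrop : zs.drop (j + 1) = z :: rs := by
        have hdd : zs.drop (j + 1) = (zs.drop j).drop 1 := by rw [List.drop_drop]
        rw [hdd, h]; rfl
      have hih := ih (j + 1) z (stepB zs acc ((j : Int) + 1)) hdrop
      push_cast at hih
      rw [hih]
      have hz : PySem.List.pyGetD zs ((j : Int) + 1) 0 = z := by
        have := getD_of_drop zs (j + 1) z rs hdrop
        push_cast at this; exact this
      have hp : PySem.List.pyGetD zs ((j : Int) + 1 - 1) 0 = prev := by
        have := getD_of_drop zs j prev (z :: rs) h
        simpa using this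
      simp only [stepB, hz, hp, altSeg]
      by_cases hd : z - prev = 0
      · simp [hd]
      · simp [hd, List.append_assoc]

lemma stepClean_warte_zero (l : List String) (t : String) (d : Int) (hd : d = 0) :
    stepClean (l ++ [t]) ("Warte " ++ PySem.Int.toStr d ++ " Minuten") = l := by
  simp [stepClean, (warte_eq_iff d).mpr hd]

lemma stepClean_warte_nonzero (l : List String) (d : Int) (hd : d ≠ 0) :
    stepClean l ("Warte " ++ PySem.Int.toStr d ++ " Minuten")
      = l ++ ["Warte " ++ PySem.Int.toStr d ++ " Minuten"] := by
  simp only [stepClean]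
  rw [if_neg (fun hh => hd ((warte_eq_iff d).mp hh))]

lemma stepClean_laufe (l : List String) (k : Int) :
    stepClean l ("laufe in den Abschnitt " ++ PySem.Int.toStr k)
      = l ++ ["laufe in den Abschnitt " ++ PySem.Int.toStr k] := by
  simp only [stepClean]
  rw [if_neg (laufe_ne k)]

lemma stepClean_grabmal (l : List String) :
    stepClean l "laufe zum Grabmal" = l ++ ["laufe zum Grabmal"] := by
  simp only [stepClean]
  rw [if_neg (by decide)]

lemma clean_seg : ∀ (rs : List Int) (z prev k : Int) (acc : List String),
    List.foldl stepClean (acc ++ ["laufe in den Abschnitt " ++ PySem.Int.toStr k])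
        (segA prev (z :: rs) k)
      = acc ++ altSeg prev (z :: rs) k ++ ["laufe zum Grabmal"] := by
  intro rs
  induction rs with
  | nil =>
      intro z prev k acc
      have hseg : segA prev [z] k
          = [("Warte " ++ PySem.Int.toStr (z - prev) ++ " Minuten"), "laufe zum Grabmal"] := rfl
      rw [hseg]
      simp only [List.foldl_cons, List.foldl_nil]
      by_cases hd : z - prev = 0
      · rw [stepClean_warte_zero _ _ _ hd, stepClean_grabmal]
        simp [altSeg, hd]
      · rw [stepClean_warte_nonzero _ _ hd, stepClean_grabmal]
        simp [altSeg, hd]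
  | cons z2 rs2 ih =>
      intro z prev k acc
      have hseg : segA prev (z :: z2 :: rs2) k
          = ("Warte " ++ PySem.Int.toStr (z - prev) ++ " Minuten")
            :: ("laufe in den Abschnitt " ++ PySem.Int.toStr (k + 1))
            :: segA z (z2 :: rs2) (k + 1) := rfl
      rw [hseg]
      simp only [List.foldl_cons]
      by_cases hd : z - prev = 0
      · rw [stepClean_warte_zero _ _ _ hd, stepClean_laufe, ih z2 z (k + 1) acc]
        simp [altSeg, hd]
      · rw [stepClean_warte_nonzero _ _ hd, stepClean_laufe,
            ih z2 z (k + 1) (acc ++ ["laufe in den Abschnitt " ++ PySem.Int.toStr k]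
              ++ ["Warte " ++ PySem.Int.toStr (z - prev) ++ " Minuten"])]
        simp [altSeg, hd]

-- ===== VERDICT (by name: the statement is the Claim_ definition above) =====
theorem erstelleAnweisungen_spec : Claim_equal_erstelleAnweisungen := by
  intro zs _ hpre
  unfold Spec_erstelleAnweisungen
  rcases zs with _ | ⟨z0, tail⟩
  · exact absurd rfl hpre
  rcases tail with _ | ⟨z1, rs⟩
  · by_cases h0 : z0 = 0
    · subst h0; decide
    · unfold erstelleAnweisungen erstelleAnweisungen_alt
      simp only [List.length_cons, List.length_nil]
      rw [show PySem.List.pyRange 1 ((0 + 1 : Nat) : Int) 1 = [] from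
        PySem.List.pyRange_one_eq_nil (by norm_num)]
      have hg : PySem.List.pyGetD [z0] (0 : Int) 0 = z0 := by
        simp [PySem.List.pyGetD]
      rw [hg]
      simp only [List.foldl_nil, List.foldl_cons]
      rw [show stepClean [] ("Warte " ++ PySem.Int.toStr z0 ++ " Minuten")
            = [] ++ ["Warte " ++ PySem.Int.toStr z0 ++ " Minuten"] from
          stepClean_warte_nonzero [] z0 h0]
      rw [if_neg h0]
      simp only [if_true, List.nil_append]
      have hL1 : ("laufe in den Abschnitt 1" : String)
          = "laufe in den Abschnitt " ++ PySem.Int.toStr 1 := by decide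
      rw [hL1, stepClean_laufe]
  · unfold erstelleAnweisungen erstelleAnweisungen_alt
    have hdrop0 : (z0 :: z1 :: rs).drop 0 = z0 :: (z1 :: rs) := rfl
    have hloop := loopA (z0 :: z1 :: rs) (z1 :: rs) 0 z0
      ["Warte " ++ PySem.Int.toStr (PySem.List.pyGetD (z0 :: z1 :: rs) 0 0) ++ " Minuten",
       "laufe in den Abschnitt 1"] hdrop0
    push_cast at hloop
    simp only []
    rw [hloop]
    have hg : PySem.List.pyGetD (z0 :: z1 :: rs) (0 : Int) 0 = z0 := by
      simp [PySem.List.pyGetD]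
    rw [hg]
    rw [List.foldl_append]
    simp only [List.foldl_cons, List.foldl_nil]
    have hL1 : ("laufe in den Abschnitt 1" : String)
        = "laufe in den Abschnitt " ++ PySem.Int.toStr 1 := by decide
    rw [hL1]
    rw [if_neg (by simp)]
    by_cases h0 : z0 = 0
    · rw [show stepClean [] ("Warte " ++ PySem.Int.toStr z0 ++ " Minuten") = [] from by
          simp [stepClean, (warte_eq_iff _).mpr h0]]
      rw [show stepClean [] ("laufe in den Abschnitt " ++ PySem.Int.toStr 1)
            = [] ++ ["laufe in den Abschnitt " ++ PySem.Int.toStr 1] from stepClean_laufe [] 1]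
      rw [clean_seg rs z1 z0 1 []]
      rw [if_pos h0]
      have hloopB := loopB (z0 :: z1 :: rs) (z1 :: rs) 0 z0 [] hdrop0
      push_cast at hloopB
      rw [hloopB]
    · rw [show stepClean [] ("Warte " ++ PySem.Int.toStr z0 ++ " Minuten")
            = [] ++ ["Warte " ++ PySem.Int.toStr z0 ++ " Minuten"] from
          stepClean_warte_nonzero [] z0 h0]
      rw [show ([] : List String) ++ ["Warte " ++ PySem.Int.toStr z0 ++ " Minuten"]
            = ["Warte " ++ PySem.Int.toStr z0 ++ " Minuten"] from rfl]
      rw [stepClean_laufe, clean_seg rs z1 z0 1 ["Warte " ++ PySem.Int.toStr z0 ++ " Minuten"]]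
      rw [if_neg h0]
      have hloopB := loopB (z0 :: z1 :: rs) (z1 :: rs) 0 z0
        ["Warte " ++ PySem.Int.toStr z0 ++ " Minuten"] hdrop0
      push_cast at hloopB
      rw [hloopB]
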